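-- pv_equiv track=rewrite | github.com/iceout/aidd-plugin | skills/aidd-core/runtime/prd_review.py | extract_review_section
-- ===== SOURCE A (Python) =====
-- DEFAULT_STATUS = "pending"
--
-- REVIEW_SECTION_HEADER = "## PRD Review"
--
-- def extract_review_section(content: str) -> tuple[str, list[str]]:
--     """Return status string and action items from the PRD Review section."""
--     lines = content.splitlines()
--     status = DEFAULT_STATUS
--     action_items: list[str] = []
--     inside_section = False
--
--     for line in lines:
--         if line.strip().startswith("## "):
--             inside_section = line.strip() == REVIEW_SECTION_HEADER
--             continue
--         if not inside_section:
--             continue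
--
--         stripped = line.strip()
--         if stripped.lower().startswith("status:"):
--             status = stripped.split(":", 1)[1].strip().lower() or DEFAULT_STATUS
--         elif stripped.startswith("- ["):
--             action_items.append(stripped)
--     return status, action_items
-- ===== SOURCE B (Python) =====
-- DEFAULT_STATUS = "pending"
--
-- REVIEW_SECTION_HEADER = "## PRD Review"
--
--
-- def extract_review_section(content: str) -> tuple[str, list[str]]:
--     """Two passes: split into (header, body) sections, then scan PRD Review bodies."""
--     # pass 1: partition lines into sections, keyed by their stripped '## ' header
--     sections: list[tuple[str, list[str]]] = []
--     for line in content.splitlines():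
--         s = line.strip()
--         if s.startswith("## "):
--             sections.append((s, []))
--         elif sections:
--             sections[-1] = (sections[-1][0], sections[-1][1] + [line])
--     # pass 2: extract status / action items from every PRD Review section body
--     status = DEFAULT_STATUS
--     action_items: list[str] = []
--     for header, body in sections:
--         if header == REVIEW_SECTION_HEADER:
--             for line in body:
--                 stripped = line.strip()
--                 if stripped.lower().startswith("status:"):
--                     status = stripped.split(":", 1)[1].strip().lower() or DEFAULT_STATUS
--                 elif stripped.startswith("- ["):
--                     action_items.append(stripped)
--     return status, action_items
-- ===== Notes on version B (the rewrite author's own statement) =====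
-- stated objective: alternative
-- what changed: Replaced the single-pass state machine with an inside-section boolean by a two-pass decomposition: first partition the lines into (header, body) sections, then scan the bodies of the '## PRD Review' sections for status and action items.
import Mathlib
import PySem

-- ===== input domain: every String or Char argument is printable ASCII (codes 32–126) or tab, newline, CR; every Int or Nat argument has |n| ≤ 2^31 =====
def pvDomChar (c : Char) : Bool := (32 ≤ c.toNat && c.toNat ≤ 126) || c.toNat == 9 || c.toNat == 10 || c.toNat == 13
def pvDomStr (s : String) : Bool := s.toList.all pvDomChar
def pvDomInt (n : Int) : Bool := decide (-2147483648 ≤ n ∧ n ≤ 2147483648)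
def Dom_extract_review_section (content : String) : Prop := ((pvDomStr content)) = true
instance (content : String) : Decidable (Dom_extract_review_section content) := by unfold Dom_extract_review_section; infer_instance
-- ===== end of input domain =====

-- B replaces A's one-pass inside-flag state machine by a two-pass section split; alternative decomposition, same cost.

-- ===== PORT A =====
-- A's loop body: state is (status, action_items, inside_section)
def stepA (st : String × List String × Bool) (line : String) : String × List String × Bool :=
  if PySem.Str.startswith (PySem.Str.strip line) "## " then
    (st.1, st.2.1, PySem.Str.strip line == "## PRD Review")
  else if st.2.2 then
    let stripped := PySem.Str.strip line
    if PySem.Str.startswith (PySem.Str.lower stripped) "status:" then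
      let v := PySem.Str.lower (PySem.Str.strip (((PySem.Str.splitMax? stripped ":" 1).getD []).getD 1 ""))
      (if v == "" then "pending" else v, st.2.1, st.2.2)
    else if PySem.Str.startswith stripped "- [" then
      (st.1, st.2.1 ++ [stripped], st.2.2)
    else st
  else st

def extract_review_section (content : String) : String × List String :=
  let r := (PySem.Str.splitlines content).foldl stepA ("pending", [], false)
  (r.1, r.2.1)

-- ===== PORT B =====
-- pass 1 step: start a new section on a '## ' header, else append the line to the last section's body
def pass1step (secs : List (String × List String)) (line : String) : List (String × List String) :=
  let s := PySem.Str.strip line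
  if PySem.Str.startswith s "## " then secs ++ [(s, [])]
  else
    match secs.getLast? with
    | none => secs
    | some last => secs.dropLast ++ [(last.1, last.2 ++ [line])]

-- body-line extraction step used in pass 2 (same extraction code as Source B's inner loop)
def rstep (st : String × List String) (line : String) : String × List String :=
  let stripped := PySem.Str.strip line
  if PySem.Str.startswith (PySem.Str.lower stripped) "status:" then
    let v := PySem.Str.lower (PySem.Str.strip (((PySem.Str.splitMax? stripped ":" 1).getD []).getD 1 ""))
    (if v == "" then "pending" else v, st.2)
  else if PySem.Str.startswith stripped "- [" then
    (st.1, st.2 ++ [stripped])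
  else st

-- pass 2 step: fold a section's body only when its header is '## PRD Review'
def pass2step (acc : String × List String) (sec : String × List String) : String × List String :=
  if sec.1 == "## PRD Review" then sec.2.foldl rstep acc else acc

def extract_review_section_alt (content : String) : String × List String :=
  let sections := (PySem.Str.splitlines content).foldl pass1step []
  sections.foldl pass2step ("pending", [])

-- ===== PRECONDITION & SPEC =====
def Spec_extract_review_section (content : String) (out : String × List String) : Prop := out = extract_review_section_alt content
instance (content : String) (out : String × List String) : Decidable (Spec_extract_review_section content out) := by unfold Spec_extract_review_section; infer_instance

-- ===== CLAIM (what is proved, stated in full; the proofs are below) =====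
def Claim_equal_extract_review_section : Prop := ∀ (content : String), Dom_extract_review_section content → Spec_extract_review_section content (extract_review_section content)

-- ===== LEMMAS AND PROOFS =====

-- pass 1 never touches sections before the last one
theorem pass1_prefix (ls : List String) :
    ∀ (secs : List (String × List String)) (h : String) (b : List String),
    List.foldl pass1step (secs ++ [(h, b)]) ls = secs ++ List.foldl pass1step [(h, b)] ls := by
  induction ls with
  | nil => intro secs h b; rfl
  | cons line rest ih =>
    intro secs h b
    simp only [List.foldl_cons]
    by_cases hc : PySem.Chars.startswith (PySem.Chars.strip line.toList) ['#', '#', ' '] = true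
    · have e1 : pass1step (secs ++ [(h, b)]) line
          = (secs ++ [(h, b)]) ++ [(PySem.Str.strip line, [])] := by
        simp [pass1step, hc]
      have e2 : pass1step [(h, b)] line
          = [(h, b)] ++ [(PySem.Str.strip line, [])] := by
        simp [pass1step, hc]
      rw [e1, e2, ih, ih]
      simp [List.append_assoc]
    · have e1 : pass1step (secs ++ [(h, b)]) line
          = secs ++ [(h, b ++ [line])] := by
        simp [pass1step, hc]
      have e2 : pass1step [(h, b)] line = [(h, b ++ [line])] := by
        simp [pass1step, hc]
      rw [e1, e2, ih]

-- core correspondence: folding pass2 over the sections built from an open section (h, b)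
-- equals continuing A's loop from the state obtained after that section so far
theorem main_lemma (ls : List String) :
    ∀ (acc : String × List String) (h : String) (b : List String),
    List.foldl pass2step acc (List.foldl pass1step [(h, b)] ls)
      = (let c := pass2step acc (h, b)
         let r := List.foldl stepA (c.1, c.2, h == "## PRD Review") ls
         (r.1, r.2.1)) := by
  induction ls with
  | nil => intro acc h b; rfl
  | cons line rest ih =>
    intro acc h b
    simp only [List.foldl_cons]
    by_cases hc : PySem.Chars.startswith (PySem.Chars.strip line.toList) ['#', '#', ' '] = true
    · have e : pass1step [(h, b)] line = [(h, b)] ++ [(PySem.Str.strip line, [])] := by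
        simp [pass1step, hc]
      rw [e, pass1_prefix, List.foldl_append]
      rw [ih]
      simp only [List.foldl_cons, List.foldl_nil]
      have estep : stepA (((pass2step acc (h, b)).1, (pass2step acc (h, b)).2, h == "## PRD Review")) line
          = ((pass2step acc (h, b)).1, (pass2step acc (h, b)).2,
             PySem.Str.strip line == "## PRD Review") := by
        simp [stepA, hc]
      simp only [List.foldl_cons, estep]
      have e2 : pass2step (pass2step acc (h, b)) (PySem.Str.strip line, []) = pass2step acc (h, b) := by
        simp [pass2step]
      rw [e2]
    · have e : pass1step [(h, b)] line = [(h, b ++ [line])] := by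
        simp [pass1step, hc]
      rw [e, ih]
      simp only [List.foldl_cons]
      by_cases hh : (h == "## PRD Review") = true
      · have e2 : pass2step acc (h, b ++ [line]) = rstep (pass2step acc (h, b)) line := by
          simp [pass2step, hh]
        have estep : stepA (((pass2step acc (h, b)).1, (pass2step acc (h, b)).2, h == "## PRD Review")) line
            = ((rstep (pass2step acc (h, b)) line).1, (rstep (pass2step acc (h, b)) line).2,
               h == "## PRD Review") := by
          simp [stepA, rstep, hc, hh]
          split_ifs <;> rfl
        rw [e2, estep]
      · have e2 : pass2step acc (h, b ++ [line]) = pass2step acc (h, b) := by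
          simp [pass2step, hh]
        have estep : stepA (((pass2step acc (h, b)).1, (pass2step acc (h, b)).2, h == "## PRD Review")) line
            = ((pass2step acc (h, b)).1, (pass2step acc (h, b)).2, h == "## PRD Review") := by
          simp [stepA, hc, hh]
        rw [e2, estep]

-- before the first header both programs just skip lines
theorem main0 (ls : List String) :
    ∀ (acc : String × List String),
    List.foldl pass2step acc (List.foldl pass1step [] ls)
      = (let r := List.foldl stepA (acc.1, acc.2, false) ls
         (r.1, r.2.1)) := by
  induction ls with
  | nil => intro acc; rfl
  | cons line rest ih =>
    intro acc
    simp only [List.foldl_cons]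
    by_cases hc : PySem.Chars.startswith (PySem.Chars.strip line.toList) ['#', '#', ' '] = true
    · have e : pass1step [] line = [(PySem.Str.strip line, [])] := by
        simp [pass1step, hc]
      rw [e, main_lemma]
      have e2 : pass2step acc (PySem.Str.strip line, []) = acc := by
        simp [pass2step]
      have estep : stepA (acc.1, acc.2, false) line
          = (acc.1, acc.2, PySem.Str.strip line == "## PRD Review") := by
        simp [stepA, hc]
      rw [e2, estep]
    · have e : pass1step [] line = [] := by
        simp [pass1step, hc]
      have estep : stepA (acc.1, acc.2, false) line = (acc.1, acc.2, false) := by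
        simp [stepA, hc]
      rw [e, estep, ih]

-- ===== VERDICT (by name: the statement is the Claim_ definition above) =====
theorem extract_review_section_spec : Claim_equal_extract_review_section := by
  intro content _
  unfold Spec_extract_review_section extract_review_section extract_review_section_alt
  rw [main0]
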